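-- pv_equiv track=rewrite | github.com/posl/comment_recommendation | script/mod_gen/3_time/en/249_A/8.py | jog
-- ===== SOURCE A (Python) =====
-- def jog(A,B,C,D,E,F,X):
--     Takahashi = 0
--     Aoki = 0
--     for i in range(1,X):
--         if i % (A+C) in range(1,A+1):
--             Takahashi += B
--         if i % (D+F) in range(1,D+1):
--             Aoki += E
--     if Takahashi > Aoki:
--         return "Takahashi"
--     elif Aoki > Takahashi:
--         return "Aoki"
--     else:
--         return "Draw"
-- ===== SOURCE B (Python) =====
-- def jog(A, B, C, D, E, F, X):
--     # Closed-form: count qualifying days in [1, X-1] per runner via full cycles + remainder.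
--     n = X - 1
--     if n < 0:
--         n = 0
--
--     def score(a, units, p):
--         if p <= 0:
--             return 0
--         k = min(a, p - 1)
--         if k <= 0:
--             return 0
--         q, r = divmod(n, p)
--         return (q * k + min(r, k)) * units
--
--     t = score(A, B, A + C)
--     ao = score(D, E, D + F)
--     if t > ao:
--         return "Takahashi"
--     if ao > t:
--         return "Aoki"
--     return "Draw"
-- ===== Notes on version B (the rewrite author's own statement) =====
-- stated objective: faster
-- what changed: Replaced the day-by-day O(X) loop with a closed-form count of qualifying days per runner (full cycles times active residues plus remainder), multiplied by the per-day score.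
import Mathlib
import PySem

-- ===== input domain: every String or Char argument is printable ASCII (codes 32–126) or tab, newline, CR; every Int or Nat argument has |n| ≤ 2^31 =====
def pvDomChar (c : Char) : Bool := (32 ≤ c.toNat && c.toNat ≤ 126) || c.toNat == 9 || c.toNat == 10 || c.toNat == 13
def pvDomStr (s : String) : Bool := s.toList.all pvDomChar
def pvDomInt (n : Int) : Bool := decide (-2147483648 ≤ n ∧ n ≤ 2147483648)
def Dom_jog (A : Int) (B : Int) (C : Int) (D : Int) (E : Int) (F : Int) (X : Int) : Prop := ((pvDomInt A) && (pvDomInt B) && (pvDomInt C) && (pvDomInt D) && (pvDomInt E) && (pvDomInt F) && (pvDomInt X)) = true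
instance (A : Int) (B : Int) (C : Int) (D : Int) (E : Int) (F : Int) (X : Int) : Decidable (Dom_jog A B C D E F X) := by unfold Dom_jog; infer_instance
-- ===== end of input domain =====

-- B replaces A's O(X) day-by-day loop by a closed-form count of qualifying days
-- (full cycles + remainder) per runner; objective: faster (asymptotic).


-- ===== PORT A =====
-- literal port: loop i over range(1, X), add B (resp. E) when i % (A+C) lies in
-- range(1, A+1) (resp. i % (D+F) in range(1, D+1)); final three-way comparison
def jogLoop (A : Int) (B : Int) (C : Int) (D : Int) (E : Int) (F : Int) (X : Int) : Int × Int :=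
  (PySem.List.pyRange 1 X 1).foldl
    (fun (s : Int × Int) (i : Int) =>
      let s1 := if 1 ≤ PySem.Int.mod i (A + C) ∧ PySem.Int.mod i (A + C) < A + 1
                then (s.1 + B, s.2) else s
      if 1 ≤ PySem.Int.mod i (D + F) ∧ PySem.Int.mod i (D + F) < D + 1
      then (s1.1, s1.2 + E) else s1)
    (0, 0)

def jog (A : Int) (B : Int) (C : Int) (D : Int) (E : Int) (F : Int) (X : Int) : String :=
  if (jogLoop A B C D E F X).1 > (jogLoop A B C D E F X).2 then "Takahashi"
  else if (jogLoop A B C D E F X).2 > (jogLoop A B C D E F X).1 then "Aoki"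
  else "Draw"

-- ===== PORT B =====
-- closed-form score: with period p = active+rest, k = min(active, p-1) qualifying
-- residues per cycle; over n = max(X-1,0) days that is n//p * k + min(n%p, k) hits
def jogScore (n : Int) (a : Int) (units : Int) (p : Int) : Int :=
  if p ≤ 0 then 0
  else if min a (p - 1) ≤ 0 then 0
  else (PySem.Int.floordiv n p * min a (p - 1)
        + min (PySem.Int.mod n p) (min a (p - 1))) * units

def jog_alt (A : Int) (B : Int) (C : Int) (D : Int) (E : Int) (F : Int) (X : Int) : String :=
  if jogScore (max (X - 1) 0) A B (A + C) > jogScore (max (X - 1) 0) D E (D + F) then "Takahashi"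
  else if jogScore (max (X - 1) 0) D E (D + F) > jogScore (max (X - 1) 0) A B (A + C) then "Aoki"
  else "Draw"

-- ===== PRECONDITION & SPEC =====
-- Pre_ excludes exactly the inputs where A raises ZeroDivisionError: a zero period
-- (A+C = 0 or D+F = 0) actually reached because the loop runs (X > 1).
def Pre_jog (A : Int) (B : Int) (C : Int) (D : Int) (E : Int) (F : Int) (X : Int) : Prop :=
  X ≤ 1 ∨ (A + C ≠ 0 ∧ D + F ≠ 0)
instance (A : Int) (B : Int) (C : Int) (D : Int) (E : Int) (F : Int) (X : Int) : Decidable (Pre_jog A B C D E F X) := by unfold Pre_jog; infer_instance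
def pvWitness_jog : Int × Int × Int × Int × Int × Int × Int := (2, 3, 1, 1, 5, 2, 10)

def Spec_jog (A : Int) (B : Int) (C : Int) (D : Int) (E : Int) (F : Int) (X : Int) (out : String) : Prop := out = jog_alt A B C D E F X
instance (A : Int) (B : Int) (C : Int) (D : Int) (E : Int) (F : Int) (X : Int) (out : String) : Decidable (Spec_jog A B C D E F X out) := by unfold Spec_jog; infer_instance

-- ===== CLAIM (what is proved, stated in full; the proofs are below) =====
def Claim_equal_jog : Prop := ∀ (A : Int) (B : Int) (C : Int) (D : Int) (E : Int) (F : Int) (X : Int), Dom_jog A B C D E F X → Pre_jog A B C D E F X → Spec_jog A B C D E F X (jog A B C D E F X)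
-- ===== LEMMAS AND PROOFS =====

-- number of qualifying i in [1, n], written as A's loop counts them
def jogCnt (a : Int) (p : Int) : Nat → Int
  | 0 => 0
  | n + 1 => jogCnt a p n +
      (if 1 ≤ PySem.Int.mod ((n : Int) + 1) p ∧ PySem.Int.mod ((n : Int) + 1) p < a + 1
       then 1 else 0)

theorem jog_fold_eq (A B C D E F : Int) : ∀ (N : Nat),
    jogLoop A B C D E F (1 + (N : Int))
    = (B * jogCnt A (A + C) N, E * jogCnt D (D + F) N) := by
  intro N
  unfold jogLoop
  induction N with
  | zero => simp [PySem.List.pyRange_one_eq_nil (by omega : (1 : Int) ≤ 1), jogCnt]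
  | succ n ih =>
    have h1 : (1 : Int) + ((n + 1 : Nat) : Int) = (1 + (n : Int)) + 1 := by push_cast; ring
    rw [h1, PySem.List.pyRange_one_succ_right (by omega), List.foldl_append, ih]
    simp only [List.foldl_cons, List.foldl_nil, jogCnt]
    have h2 : (1 : Int) + (n : Int) = (n : Int) + 1 := by ring
    rw [h2]
    split_ifs <;> simp only [Prod.mk.injEq] <;> constructor <;> ring

theorem jogCnt_neg (a p : Int) (hp : p < 0) : ∀ (N : Nat), jogCnt a p N = 0 := by
  intro N
  induction N with
  | zero => rfl
  | succ n ih =>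
    have hm : PySem.Int.mod ((n : Int) + 1) p ≤ 0 := by
      have := PySem.Int.mod_neg_neg (-((n : Int) + 1)) (-p)
      simp only [neg_neg] at this
      rw [this]
      have : 0 ≤ PySem.Int.mod (-((n : Int) + 1)) (-p) := by
        rw [PySem.Int.mod_eq_emod_of_pos (by omega)]
        exact Int.emod_nonneg _ (by omega)
      omega
    simp only [jogCnt, ih]
    rw [if_neg (by omega)]
    omega

theorem jogCnt_small (a p : Int) (hp : 0 < p) (hk : min a (p - 1) ≤ 0) :
    ∀ (N : Nat), jogCnt a p N = 0 := by
  intro N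
  induction N with
  | zero => rfl
  | succ n ih =>
    have h0 : 0 ≤ PySem.Int.mod ((n : Int) + 1) p := by
      rw [PySem.Int.mod_eq_emod_of_pos hp]; exact Int.emod_nonneg _ (by omega)
    have h1 : PySem.Int.mod ((n : Int) + 1) p < p := by
      rw [PySem.Int.mod_eq_emod_of_pos hp]; exact Int.emod_lt_of_pos _ hp
    simp only [jogCnt, ih]
    rw [if_neg (by omega)]
    omega

theorem jogCnt_closed (a p : Int) (hp : 0 < p) (hk : 0 < min a (p - 1)) : ∀ (N : Nat),
    jogCnt a p N = ((N : Int) / p) * min a (p - 1) + min ((N : Int) % p) (min a (p - 1)) := by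
  intro N
  induction N with
  | zero => simp [jogCnt]; omega
  | succ n ih =>
    set k := min a (p - 1) with hkdef
    have hq := Int.ediv_add_emod (n : Int) p
    have hr0 : 0 ≤ (n : Int) % p := Int.emod_nonneg _ (by omega)
    have hr1 : (n : Int) % p < p := Int.emod_lt_of_pos _ hp
    simp only [jogCnt, ih, PySem.Int.mod_eq_emod_of_pos hp]
    push_cast
    by_cases hcase : (n : Int) % p + 1 < p
    · have huniq : ((n : Int) + 1) / p = (n : Int) / p ∧ ((n : Int) + 1) % p = (n : Int) % p + 1 :=
        (Int.ediv_emod_unique hp).mpr (by constructor; omega; omega)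
      rw [huniq.1, huniq.2]
      split_ifs <;> omega
    · have huniq : ((n : Int) + 1) / p = (n : Int) / p + 1 ∧ ((n : Int) + 1) % p = 0 :=
        (Int.ediv_emod_unique hp).mpr (by constructor; nlinarith; omega)
      rw [huniq.1, huniq.2, add_mul]
      have hrk : min ((n : Int) % p) k = k := by omega
      rw [hrk, if_neg (by omega)]
      omega

theorem score_eq (a u p : Int) (hp : p ≠ 0) (N : Nat) :
    u * jogCnt a p N = jogScore (N : Int) a u p := by
  unfold jogScore
  rcases lt_or_gt_of_ne hp with hneg | hpos
  · rw [jogCnt_neg a p hneg N, if_pos (by omega), mul_zero]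
  · rw [if_neg (by omega)]
    by_cases hk : min a (p - 1) ≤ 0
    · rw [if_pos hk, jogCnt_small a p hpos hk N, mul_zero]
    · rw [if_neg hk, jogCnt_closed a p hpos (by omega) N,
        PySem.Int.floordiv_eq_ediv_of_pos hpos, PySem.Int.mod_eq_emod_of_pos hpos]
      ring

theorem jogScore_zero (a u p : Int) : jogScore 0 a u p = 0 := by
  unfold jogScore
  split_ifs with h1 h2
  · rfl
  · rfl
  · rw [PySem.Int.floordiv_eq_ediv_of_pos (by omega), PySem.Int.mod_eq_emod_of_pos (by omega),
      Int.zero_ediv, Int.zero_emod, zero_mul, zero_add, min_eq_left (by omega), zero_mul]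

-- ===== VERDICT (by name: the statement is the Claim_ definition above) =====
theorem jogLoop_nil (A B C D E F X : Int) (hX : X ≤ 1) : jogLoop A B C D E F X = (0, 0) := by
  unfold jogLoop
  rw [PySem.List.pyRange_one_eq_nil hX, List.foldl_nil]

theorem jog_spec : Claim_equal_jog := by
  intro A B C D E F X _ hPre
  unfold Spec_jog jog jog_alt
  by_cases hX : X ≤ 1
  · rw [jogLoop_nil A B C D E F X hX,
      show max (X - 1) 0 = (0 : Int) by omega, jogScore_zero, jogScore_zero]
  · rcases hPre with h | ⟨h1, h2⟩
    · omega
    · obtain ⟨N, hXeq, hn⟩ : ∃ N : Nat, X = 1 + (N : Int) ∧ max (X - 1) 0 = (N : Int) :=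
        ⟨(X - 1).toNat, by omega, by omega⟩
      rw [hn, hXeq, jog_fold_eq A B C D E F N,
        score_eq A B (A + C) h1 N, score_eq D E (D + F) h2 N]
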